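-- pv_equiv track=rewrite | github.com/ma0723/Min_Algorithm | SWEA/SWEA_4861_회문.py | find
-- ===== SOURCE A (Python) =====
-- def find(t, N, M):
--     for j in range(N-M+1):
--     # M개의 글자가 회문인지 판별
--     # 시작점을 0부터 N-M까지 인덱스
--         cnt = 0
--         # 앞뒤글자 일치하는 개수 초기값
--         for k in range(M//2):
--             if t[j+k] == t[j+M-1-k]:
--             # 시작 인덱스+ k와 마지막 인덱스 + k의 값이 같다면
--             # 첫번째 글자와 뒤에서 첫번째 글자
--             # 두번째 글자와 뒤에서 두번째 글자
--                 cnt += 1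
--             else:
--                 break
--                 # k의 for문 종료
--         if cnt == M//2:
--             return j
--             # 회문인 경우 시작점 인덱스 반환
--         else:
--             pass
--     return -1
-- ===== SOURCE B (Python) =====
-- def find(t, N, M):
--     # Compare each window against the corresponding window of the reversed
--     # string (reversed once up front) instead of char-by-char counting.
--     r = t[::-1]
--     L = len(t)
--     for j in range(N - M + 1):
--         if t[j:j+M] == r[L-j-M:L-j]:
--             return j
--     return -1
-- ===== Notes on version B (the rewrite author's own statement) =====
-- stated objective: alternative
-- what changed: A tests each window with an index-pair counting inner loop (cnt vs M//2 with early break); B reverses the string once and tests each window by comparing it with the corresponding window of the reversed string via slicing.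
-- outside the precondition, e.g. on find('aa', 5, 2): A returns 0, B returns 0; on find('ab', 2, -1): A returns -1, B returns 1
import Mathlib
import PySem

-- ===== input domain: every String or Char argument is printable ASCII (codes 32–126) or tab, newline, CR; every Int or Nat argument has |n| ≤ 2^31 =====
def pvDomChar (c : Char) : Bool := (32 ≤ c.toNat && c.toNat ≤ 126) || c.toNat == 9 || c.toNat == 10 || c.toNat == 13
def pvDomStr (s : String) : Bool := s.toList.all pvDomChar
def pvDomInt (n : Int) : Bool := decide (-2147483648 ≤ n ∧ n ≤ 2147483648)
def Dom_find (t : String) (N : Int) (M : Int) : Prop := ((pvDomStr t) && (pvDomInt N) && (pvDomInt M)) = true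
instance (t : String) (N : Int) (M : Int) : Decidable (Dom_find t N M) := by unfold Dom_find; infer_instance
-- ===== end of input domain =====

-- B replaces A's per-window char-counting inner loop by comparing each window with
-- the matching window of the once-reversed string (objective: alternative).

-- ===== PORT A =====
-- inner loop 'for k in range(M//2)' with early break; cnt accumulator.
-- t[j+k] is ported with pyGetD: under Pre_find every accessed index is in range
-- (where Python would raise IndexError the input is excluded by Pre_find).
def findInner (tl : List Char) (j M : Int) : List Int → Int → Int
  | [], cnt => cnt
  | k :: ks, cnt =>
    if PySem.List.pyGetD tl (j + k) ' ' = PySem.List.pyGetD tl (j + M - 1 - k) ' ' then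
      findInner tl j M ks (cnt + 1)
    else cnt

-- outer loop 'for j in range(N-M+1)' with early return
def findLoop (tl : List Char) (M : Int) : List Int → Int
  | [] => -1
  | j :: js =>
    if findInner tl j M (PySem.List.pyRange 0 (PySem.Int.floordiv M 2) 1) 0
        = PySem.Int.floordiv M 2 then j
    else findLoop tl M js

def find (t : String) (N : Int) (M : Int) : Int :=
  findLoop t.toList M (PySem.List.pyRange 0 (N - M + 1) 1)

-- ===== PORT B =====
-- Source B: r = t[::-1]; L = len(t); return first j with t[j:j+M] == r[L-j-M:L-j], else -1
def findAltLoop (tl rl : List Char) (L M : Int) : List Int → Int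
  | [] => -1
  | j :: js =>
    if PySem.List.slice tl (some j) (some (j + M))
        = PySem.List.slice rl (some (L - j - M)) (some (L - j)) then j
    else findAltLoop tl rl L M js

def find_alt (t : String) (N : Int) (M : Int) : Int :=
  let rl := t.toList.reverse      -- t[::-1]  (PySem.List.slice?_none_none_neg_one)
  let L : Int := t.toList.length  -- len(t)
  findAltLoop t.toList rl L M (PySem.List.pyRange 0 (N - M + 1) 1)

-- ===== PRECONDITION & SPEC =====
-- Pre_find excludes (a) negative M — outside the natural domain of a palindrome
-- length, where A's -1 and B's slice arithmetic are both accidents — and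
-- (b) 2 ≤ M ≤ N with N > len(t), where A in general raises IndexError
-- (on some such inputs A happens to return before the bad access).
def Pre_find (t : String) (N : Int) (M : Int) : Prop :=
  0 ≤ M ∧ (2 ≤ M → M ≤ N → N ≤ (t.toList.length : Int))
instance (t : String) (N : Int) (M : Int) : Decidable (Pre_find t N M) := by
  unfold Pre_find; infer_instance

def pvWitness_find : String × Int × Int := ("abcba", 5, 5)

def Spec_find (t : String) (N : Int) (M : Int) (out : Int) : Prop := out = find_alt t N M
instance (t : String) (N : Int) (M : Int) (out : Int) : Decidable (Spec_find t N M out) := by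
  unfold Spec_find; infer_instance

-- ===== CLAIM (what is proved, stated in full; the proofs are below) =====
def Claim_equal_find : Prop := ∀ (t : String) (N : Int) (M : Int),
  Dom_find t N M → Pre_find t N M → Spec_find t N M (find t N M)

-- ===== LEMMAS AND PROOFS =====

-- A's inner loop returns c + |ks| iff every probed pair of characters matches
theorem findInner_eq_iff (tl : List Char) (j M : Int) (ks : List Int) (c : Int) :
    findInner tl j M ks c = c + ks.length ↔
    ∀ k ∈ ks, PySem.List.pyGetD tl (j + k) ' ' = PySem.List.pyGetD tl (j + M - 1 - k) ' ' := by
  induction ks generalizing c with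
  | nil => simp [findInner]
  | cons k ks ih =>
    simp only [findInner, List.length_cons, List.mem_cons]
    by_cases hc : PySem.List.pyGetD tl (j + k) ' ' = PySem.List.pyGetD tl (j + M - 1 - k) ' '
    · rw [if_pos hc]
      constructor
      · intro hh k' hk'
        have hx : findInner tl j M ks (c + 1) = (c + 1) + (ks.length : Int) := by omega
        rcases hk' with h1 | h1
        · subst h1; exact hc
        · exact ((ih (c + 1)).mp hx) k' h1
      · intro hh
        have hx := (ih (c + 1)).mpr (fun k' hk' => hh k' (Or.inr hk'))
        omega
    · rw [if_neg hc]
      constructor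
      · intro h; exfalso; push_cast at h; omega
      · intro h; exact absurd (h k (Or.inl rfl)) hc

-- the two loops agree when the branch conditions agree on every visited j
theorem loops_eq (tl rl : List Char) (L M : Int) (js : List Int)
    (h : ∀ j ∈ js,
      (findInner tl j M (PySem.List.pyRange 0 (PySem.Int.floordiv M 2) 1) 0
          = PySem.Int.floordiv M 2) ↔
      (PySem.List.slice tl (some j) (some (j + M))
          = PySem.List.slice rl (some (L - j - M)) (some (L - j)))) :
    findLoop tl M js = findAltLoop tl rl L M js := by
  induction js with
  | nil => rfl
  | cons j js ih =>
    have hj := h j (List.mem_cons_self)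
    simp only [findLoop, findAltLoop]
    by_cases hc : findInner tl j M (PySem.List.pyRange 0 (PySem.Int.floordiv M 2) 1) 0
        = PySem.Int.floordiv M 2
    · rw [if_pos hc, if_pos (hj.mp hc)]
    · rw [if_neg hc, if_neg (fun hb => hc (hj.mpr hb))]
      exact ih (fun j' hj' => h j' (List.mem_cons_of_mem _ hj'))

-- half-range pair condition iff full-range pair condition (pure index symmetry)
theorem half_iff_full (g : Nat → Char) (jn mn : Nat) :
    (∀ kn, kn < mn / 2 → g (jn + kn) = g (jn + mn - 1 - kn)) ↔
    (∀ kn, kn < mn → g (jn + kn) = g (jn + mn - 1 - kn)) := by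
  constructor
  · intro h kn hkn
    by_cases h1 : kn < mn / 2
    · exact h kn h1
    · rcases (by omega : mn - 1 - kn < mn / 2 ∨ mn - 1 - kn = kn) with h2 | h2
      · have := h (mn - 1 - kn) h2
        rw [show jn + mn - 1 - (mn - 1 - kn) = jn + kn from by omega] at this
        rw [show jn + (mn - 1 - kn) = jn + mn - 1 - kn from by omega] at this
        exact this.symm
      · rw [show jn + mn - 1 - kn = jn + kn from by omega]
  · intro h kn hkn; exact h kn (by omega)

-- the slice-vs-reversed-slice equality iff the full-range pair condition
theorem slice_rev_eq_iff (tl : List Char) (jn mn : Nat) (h : jn + mn ≤ tl.length) :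
    ((tl.drop jn).take mn = (tl.reverse.drop (tl.length - jn - mn)).take mn) ↔
    (∀ kn, kn < mn → tl.getD (jn + kn) ' ' = tl.getD (jn + mn - 1 - kn) ' ') := by
  constructor
  · intro he kn hkn
    have h1 : jn + kn < tl.length := by omega
    have h2 : jn + mn - 1 - kn < tl.length := by omega
    have hlen : kn < ((tl.drop jn).take mn).length := by
      simp [List.length_take, List.length_drop]; omega
    have := List.getElem_of_eq he hlen
    simp only [List.getElem_take, List.getElem_drop, List.getElem_reverse] at this
    rw [List.getD_eq_getElem _ _ h1, List.getD_eq_getElem _ _ h2]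
    simp only [show tl.length - 1 - (tl.length - jn - mn + kn) = jn + mn - 1 - kn from by omega] at this
    exact this
  · intro hp
    apply List.ext_getElem
    · simp [List.length_take, List.length_drop, List.length_reverse]; omega
    · intro i hi1 hi2
      have himn : i < mn := by
        simp [List.length_take, List.length_drop] at hi1; omega
      simp only [List.getElem_take, List.getElem_drop, List.getElem_reverse]
      have := hp i himn
      rw [List.getD_eq_getElem _ _ (by omega : jn + i < tl.length),
        List.getD_eq_getElem _ _ (by omega : jn + mn - 1 - i < tl.length)] at this
      simp only [show tl.length - 1 - (tl.length - jn - mn + i) = jn + mn - 1 - i from by omega]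
      exact this

-- ===== VERDICT (by name: the statement is the Claim_ definition above) =====
theorem find_spec : Claim_equal_find := by
  intro t N M _hdom hpre
  obtain ⟨hM0, hNL⟩ := hpre
  unfold Spec_find find find_alt
  set tl := t.toList with htl
  set L' : Nat := tl.length with hL'
  by_cases hM2 : 2 ≤ M
  · -- main case: apply loops_eq with the per-j condition equivalence
    apply loops_eq
    intro j hj
    rw [PySem.List.mem_pyRange_one] at hj
    obtain ⟨hj0, hjlt⟩ := hj
    have hMN : M ≤ N := by omega
    have hNlen : N ≤ (L' : Int) := hNL hM2 hMN
    have hfd : PySem.Int.floordiv M 2 = M / 2 :=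
      PySem.Int.floordiv_eq_ediv_of_pos (by omega)
    set jn := j.toNat with hjn
    set mn := M.toNat with hmn
    have hbound : jn + mn ≤ L' := by omega
    -- condA ↔ half-range condition
    have hA : (findInner tl j M (PySem.List.pyRange 0 (PySem.Int.floordiv M 2) 1) 0
          = PySem.Int.floordiv M 2) ↔
        (∀ kn, kn < mn / 2 → tl.getD (jn + kn) ' ' = tl.getD (jn + mn - 1 - kn) ' ') := by
      rw [hfd]
      have key := findInner_eq_iff tl j M (PySem.List.pyRange 0 (M / 2) 1) 0
      rw [show ((0 : Int) + ((PySem.List.pyRange 0 (M / 2) 1).length : Int)) = M / 2 from by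
        rw [PySem.List.length_pyRange_one]; omega] at key
      rw [key]
      constructor
      · intro h kn hkn
        have hk0 : (0 : Int) ≤ (kn : Int) := by positivity
        have hkin : (kn : Int) ∈ PySem.List.pyRange 0 (M / 2) 1 := by
          rw [PySem.List.mem_pyRange_one]; omega
        have := h (kn : Int) hkin
        rw [PySem.List.pyGetD_of_nonneg tl _ (by omega), PySem.List.pyGetD_of_nonneg tl _ (by omega)] at this
        rw [show (j + kn).toNat = jn + kn from by omega,
          show (j + M - 1 - kn).toNat = jn + mn - 1 - kn from by omega] at this
        exact this
      · intro h k hk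
        rw [PySem.List.mem_pyRange_one] at hk
        have := h k.toNat (by omega)
        rw [PySem.List.pyGetD_of_nonneg tl _ (by omega), PySem.List.pyGetD_of_nonneg tl _ (by omega)]
        rw [show (j + k).toNat = jn + k.toNat from by omega,
          show (j + M - 1 - k).toNat = jn + mn - 1 - k.toNat from by omega]
        exact this
    -- condB ↔ full-range condition
    have hB : (PySem.List.slice tl (some j) (some (j + M))
          = PySem.List.slice (tl.reverse) (some ((L' : Int) - j - M)) (some ((L' : Int) - j))) ↔
        (∀ kn, kn < mn → tl.getD (jn + kn) ' ' = tl.getD (jn + mn - 1 - kn) ' ') := by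
      rw [PySem.List.slice_toNat tl (by omega) (by omega),
        PySem.List.slice_toNat tl.reverse (by omega) (by omega)]
      rw [show ((L' : Int) - j).toNat - ((L' : Int) - j - M).toNat = mn from by omega,
        show ((L' : Int) - j - M).toNat = L' - jn - mn from by omega,
        show (j + M).toNat - j.toNat = mn from by omega]
      exact slice_rev_eq_iff tl jn mn hbound
    rw [hA, hB]
    exact half_iff_full (fun n => tl.getD n ' ') jn mn
  · -- M = 0 or M = 1
    have hM01 : M = 0 ∨ M = 1 := by omega
    by_cases hMN : M ≤ N
    · -- range is 0 :: rest; both loops return 0 at j = 0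
      rw [PySem.List.pyRange_one_cons (by omega)]
      have hfd0 : PySem.Int.floordiv M 2 = 0 := by
        rw [PySem.Int.floordiv_eq_ediv_of_pos (by omega)]; omega
      have hA0 : findInner tl 0 M (PySem.List.pyRange 0 (PySem.Int.floordiv M 2) 1) 0
          = PySem.Int.floordiv M 2 := by
        rw [hfd0, PySem.List.pyRange_one_eq_nil (by omega)]; rfl
      have hB0 : PySem.List.slice tl (some 0) (some (0 + M))
          = PySem.List.slice tl.reverse (some ((L' : Int) - 0 - M)) (some ((L' : Int) - 0)) := by
        rcases hM01 with hM | hM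
        · subst hM
          rw [PySem.List.slice_toNat tl (by omega) (by omega),
            PySem.List.slice_toNat tl.reverse (by omega) (by omega)]
          simp
        · subst hM
          rcases Nat.eq_zero_or_pos L' with hL0 | hLpos
          · -- empty string: every slice is empty
            have hrl : tl.reverse.length = tl.length := List.length_reverse
            have e1 : (PySem.List.slice tl (some 0) (some (0 + 1))).length = 0 := by
              rw [PySem.List.length_slice]
              have c1 := PySem.List.clampIdx_le (n := tl.length) (i := ((0 : Int) + 1))
              have c2 := PySem.List.clampIdx_le (n := tl.length) (i := (0 : Int))
              omega
            have e2 : (PySem.List.slice tl.reverse (some ((L' : Int) - 0 - 1)) (some ((L' : Int) - 0))).length = 0 := by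
              rw [PySem.List.length_slice]
              have c1 := PySem.List.clampIdx_le (n := tl.reverse.length) (i := ((L' : Int) - 0 - 1))
              have c2 := PySem.List.clampIdx_le (n := tl.reverse.length) (i := ((L' : Int) - 0))
              omega
            rw [List.eq_nil_of_length_eq_zero e1, List.eq_nil_of_length_eq_zero e2]
          · rw [PySem.List.slice_toNat tl (by omega) (by omega),
              PySem.List.slice_toNat tl.reverse (by omega) (by omega)]
            rw [show ((L' : Int) - 0).toNat - ((L' : Int) - 0 - 1).toNat = 1 from by omega,
              show ((L' : Int) - 0 - 1).toNat = L' - 0 - 1 from by omega,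
              show ((0 : Int) + 1).toNat - (0 : Int).toNat = 1 from by omega,
              show (0 : Int).toNat = 0 from rfl]
            rw [slice_rev_eq_iff tl 0 1 (by omega)]
            intro kn hkn
            rw [show kn = 0 from by omega]
      simp only [findLoop, findAltLoop]
      rw [if_pos hA0, if_pos hB0]
    · -- empty range: both -1
      rw [PySem.List.pyRange_one_eq_nil (by omega)]
      rfl
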